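-- pv_equiv track=rewrite | github.com/modeseven-lfreleng-actions/gerrit-clone-action | src/gerrit_clone/content_filter.py | normalize_file_patterns
-- ===== SOURCE A (Python) =====
-- def normalize_file_patterns(raw: list[str]) -> list[str]:
--     """Normalize a list of file path patterns.
--
--     Strips whitespace, splits on commas, drops empties,
--     de-duplicates while preserving insertion order.
--
--     Args:
--         raw: List of raw pattern strings (may contain commas).
--
--     Returns:
--         Normalized, de-duplicated list of patterns.
--     """
--     seen: set[str] = set()
--     normalized: list[str] = []
--     for entry in raw:
--         for comma_part in entry.split(","):
--             clean = comma_part.strip()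
--             if clean and clean not in seen:
--                 normalized.append(clean)
--                 seen.add(clean)
--     return normalized
-- ===== SOURCE B (Python) =====
-- def normalize_file_patterns(raw: list[str]) -> list[str]:
--     """Normalize file patterns: flatten tokens, then dedupe by repeatedly
--     filtering the remaining work list (no seen-set at all)."""
--     work = [t for e in raw for p in e.split(",") if (t := p.strip())]
--     out: list[str] = []
--     while work:
--         head = work[0]
--         out.append(head)
--         work = [t for t in work[1:] if t != head]
--     return out
-- ===== Notes on version B (the rewrite author's own statement) =====
-- stated objective: alternative
-- what changed: Removes the seen-set entirely: B flattens all stripped non-empty tokens, then deduplicates by repeatedly taking the head of the remaining work list and filtering every later copy of it out of the tail, instead of A's single pass with an inline membership set.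
import Mathlib
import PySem

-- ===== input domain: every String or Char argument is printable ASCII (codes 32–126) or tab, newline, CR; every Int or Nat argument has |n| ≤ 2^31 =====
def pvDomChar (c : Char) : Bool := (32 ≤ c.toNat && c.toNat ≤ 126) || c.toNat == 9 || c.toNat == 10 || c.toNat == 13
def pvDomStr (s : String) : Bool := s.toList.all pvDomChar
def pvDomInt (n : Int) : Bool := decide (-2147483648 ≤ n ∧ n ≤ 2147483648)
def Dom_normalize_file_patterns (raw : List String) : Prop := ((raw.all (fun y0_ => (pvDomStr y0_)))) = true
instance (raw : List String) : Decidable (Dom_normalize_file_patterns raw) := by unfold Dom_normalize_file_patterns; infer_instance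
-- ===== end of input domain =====

-- B drops A's seen-set: it flattens the stripped non-empty tokens, then dedupes by
-- repeatedly taking the head and filtering its later copies out of the tail (alternative decomposition, same results).
-- ===== PORT A =====
def pvSplitComma (e : String) : List String :=
  -- e.split(","): the separator is the nonempty literal ",", so split? is always `some`
  (PySem.Str.split? e ",").getD []

-- inner loop body: for comma_part in entry.split(","): clean = comma_part.strip(); if clean and clean not in seen: append/add
def pvStepA (st : PySem.Set String × List String) (comma_part : String) : PySem.Set String × List String :=
  let clean := PySem.Str.strip comma_part
  if clean ≠ "" ∧ ¬ st.1.contains clean then (st.1.add clean, st.2 ++ [clean]) else st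

def normalize_file_patterns (raw : List String) : List String :=
  (raw.foldl (fun st entry => (pvSplitComma entry).foldl pvStepA st) (PySem.Set.empty, [])).2

-- ===== PORT B =====
-- while work: head = work[0]; out.append(head); work = [t for t in work[1:] if t != head]
def pvFilterDedup : List String → List String
  | [] => []
  | head :: rest => head :: pvFilterDedup (rest.filter (fun t => t ≠ head))
termination_by l => l.length
decreasing_by
  refine Nat.lt_succ_of_le ?_
  rw [List.length_unattach]
  exact le_trans (List.length_filter_le _ _) (by rw [List.length_attach])

def normalize_file_patterns_alt (raw : List String) : List String :=
  -- work = [t for e in raw for p in e.split(",") if (t := p.strip())]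
  let work := (raw.flatMap (fun e => (pvSplitComma e).map PySem.Str.strip)).filter (fun t => t ≠ "")
  pvFilterDedup work

-- ===== PRECONDITION & SPEC =====
def Spec_normalize_file_patterns (raw : List String) (out : List String) : Prop := out = normalize_file_patterns_alt raw
instance (raw : List String) (out : List String) : Decidable (Spec_normalize_file_patterns raw out) := by unfold Spec_normalize_file_patterns; infer_instance

-- ===== CLAIM (what is proved, stated in full; the proofs are below) =====
def Claim_equal_normalize_file_patterns : Prop := ∀ (raw : List String), Dom_normalize_file_patterns raw → Spec_normalize_file_patterns raw (normalize_file_patterns raw)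

-- ===== LEMMAS AND PROOFS =====
-- A's nested foldl over raw is the foldl over the flattened comma parts
theorem pv_foldl_flatMap {α β : Type} (f : β → α → β) (g : String → List α) :
    ∀ (raw : List String) (st : β),
      raw.foldl (fun st e => (g e).foldl f st) st = (raw.flatMap g).foldl f st := by
  intro raw
  induction raw with
  | nil => intro st; rfl
  | cons e rest ih => intro st; simp [List.flatMap_cons, List.foldl_append, ih]

-- loop invariant: seen (as a list) stays equal to the accumulator, and the fold
-- of pvStepA over any token list is PySem.Set.add folded over the stripped, non-empty tokens
theorem pv_stepA_inv : ∀ (ys : List String) (s : List String),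
    ys.foldl pvStepA (s, s) =
      (((ys.map PySem.Str.strip).filter (fun c => c ≠ "")).foldl PySem.Set.add s,
       ((ys.map PySem.Str.strip).filter (fun c => c ≠ "")).foldl PySem.Set.add s) := by
  intro ys
  induction ys with
  | nil => intro s; rfl
  | cons p rest ih =>
    intro s
    by_cases h0 : PySem.Str.strip p = ""
    · simpa [pvStepA, h0] using ih s
    · by_cases h1 : PySem.Str.strip p ∈ s
      · simpa [pvStepA, PySem.Set.contains, PySem.Set.add, h0, h1] using ih s
      · simpa [pvStepA, PySem.Set.contains, PySem.Set.add, h0, h1] using ih (s ++ [PySem.Str.strip p])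

-- unfolding lemmas for the well-founded recursion of pvFilterDedup
theorem pvFilterDedup_nil : pvFilterDedup [] = [] := by rw [pvFilterDedup.eq_def]
theorem pvFilterDedup_cons (y : String) (xs : List String) :
    pvFilterDedup (y :: xs) = y :: pvFilterDedup (xs.filter (fun t => t ≠ y)) := by
  rw [pvFilterDedup.eq_def]

-- folding Set.add from seen-list s appends exactly the head-filter dedup of the tokens not already in s
theorem pv_foldl_add_eq_filterDedup : ∀ (l : List String) (s : List String),
    l.foldl PySem.Set.add s = s ++ pvFilterDedup (l.filter (fun t => ¬ t ∈ s)) := by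
  intro l
  induction l with
  | nil => intro s; simp [pvFilterDedup_nil]
  | cons y xs ih =>
    intro s
    by_cases hy : y ∈ s
    · simp only [List.foldl_cons, PySem.Set.add, PySem.Set.contains]
      rw [if_pos (by simpa using hy)]
      simpa [hy] using ih s
    · simp only [List.foldl_cons, PySem.Set.add, PySem.Set.contains]
      rw [if_neg (by simpa using hy), ih (s ++ [y])]
      have hfilt : xs.filter (fun t => decide (¬ t ∈ s ++ [y])) =
          (xs.filter (fun t => decide (¬ t ∈ s))).filter (fun t => t ≠ y) := by
        rw [List.filter_filter]
        apply List.filter_congr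
        intro t _
        by_cases h1 : t ∈ s <;> by_cases h2 : t = y <;> simp [h1, h2]
      simp only [List.filter_cons, hy, decide_not]
      rw [if_pos (by simp)]
      rw [pvFilterDedup_cons]
      rw [List.append_assoc, List.singleton_append]
      refine congrArg (fun l => s ++ y :: pvFilterDedup l) ?_
      simp only [decide_not, List.filter_filter]
      apply List.filter_congr
      intro t _
      by_cases h1 : t ∈ s <;> by_cases h2 : t = y <;> simp [h1, h2]

-- ===== VERDICT (by name: the statement is the Claim_ definition above) =====
theorem normalize_file_patterns_spec : Claim_equal_normalize_file_patterns := by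
  intro raw _
  unfold Spec_normalize_file_patterns normalize_file_patterns normalize_file_patterns_alt
  rw [pv_foldl_flatMap pvStepA pvSplitComma raw (PySem.Set.empty, [])]
  show ((raw.flatMap pvSplitComma).foldl pvStepA (([] : List String), [])).2 = _
  rw [pv_stepA_inv, pv_foldl_add_eq_filterDedup]
  simp [List.map_flatMap]
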